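-- pv_equiv track=rewrite | github.com/souped/Advent-of-Code | 2020/aoc10.py | part2
-- ===== SOURCE A (Python) =====
-- def part2(a, count=0, index = None):
--     if index is None: index = len(a)-2
--     if index < len(a) - 1 and index > 1:
--         diff = abs(a[index]-a[index-1])
--         diff2= abs(a[index]-a[index-2])
--         if diff < 2 and diff2 < 3:
--             del a[index-1]
--             return part2(a,count+1,index-1)
--
--     return count
-- ===== SOURCE B (Python) =====
-- def part2(a, count=0, index=None):
--     # Single pivot-scan: A's recursion repeatedly deletes a[index-1] while the
--     # "current" element stays the original a[index]; so count how many
--     # predecessors the pivot can absorb, then delete them in one slice.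
--     n = len(a)
--     if index is None:
--         index = n - 2
--     if not (1 < index < n - 1):
--         return count
--     x = a[index]
--     k = 0
--     while index - k > 1 and abs(x - a[index - 1 - k]) < 2 and abs(x - a[index - 2 - k]) < 3:
--         k += 1
--     del a[index - k:index]
--     return count + k
-- ===== Notes on version B (the rewrite author's own statement) =====
-- stated objective: alternative
-- what changed: Replaces the tail recursion that deletes one predecessor per call with a single pivot-scan: the current element is always the original a[index], so B counts in one loop how many predecessors it can absorb and deletes them with one slice deletion.
import Mathlib
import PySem

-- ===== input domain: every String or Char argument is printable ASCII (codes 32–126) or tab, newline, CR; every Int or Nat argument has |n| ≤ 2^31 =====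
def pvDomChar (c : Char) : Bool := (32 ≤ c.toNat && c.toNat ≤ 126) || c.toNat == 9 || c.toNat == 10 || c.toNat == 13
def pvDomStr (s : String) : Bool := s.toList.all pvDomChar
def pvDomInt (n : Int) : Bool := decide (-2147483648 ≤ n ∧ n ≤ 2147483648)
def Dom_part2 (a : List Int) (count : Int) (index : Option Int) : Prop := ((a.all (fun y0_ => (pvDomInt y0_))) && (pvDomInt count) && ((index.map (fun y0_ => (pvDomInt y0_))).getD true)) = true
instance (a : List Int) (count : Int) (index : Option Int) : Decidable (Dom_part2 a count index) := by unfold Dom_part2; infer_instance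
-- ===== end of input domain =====

-- B replaces A's delete-one-predecessor-per-call recursion by a single pivot scan; the
-- equivalence proved is about the RETURN value only (both Pythons mutate `a` identically).

-- ===== PORT A =====
-- recursive worker: the Python body after the `index is None` default handling.
-- All list accesses are at provably in-range nonnegative indices (1 < i < len a - 1),
-- so pyGetD … 0 is exact, and `del a[index-1]` is eraseIdx at the nonnegative (i-1).
def part2go (a : List Int) (count : Int) (i : Int) : Int :=
  if h : i < (a.length : Int) - 1 ∧ 1 < i then
    let diff := |PySem.List.pyGetD a i 0 - PySem.List.pyGetD a (i - 1) 0|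
    let diff2 := |PySem.List.pyGetD a i 0 - PySem.List.pyGetD a (i - 2) 0|
    if diff < 2 ∧ diff2 < 3 then
      part2go (a.eraseIdx (i - 1).toNat) (count + 1) (i - 1)
    else count
  else count
termination_by a.length
decreasing_by
  have hm : (i - 1).toNat < a.length := by omega
  have := List.length_eraseIdx_of_lt hm
  omega

def part2 (a : List Int) (count : Int) (index : Option Int) : Int :=
  part2go a count (index.getD ((a.length : Int) - 2))

-- ===== PORT B =====
-- the `while` loop of Source B: counts how many steps the pivot value x absorbs,
-- scanning downward from position p (the loop's `index - k`).
def part2Scan (a : List Int) (x : Int) (p : Int) : Int :=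
  if h : 1 < p ∧ |x - PySem.List.pyGetD a (p - 1) 0| < 2 ∧ |x - PySem.List.pyGetD a (p - 2) 0| < 3 then
    part2Scan a x (p - 1) + 1
  else 0
termination_by p.toNat
decreasing_by omega

-- Source B also performs `del a[index-k:index]`; only the return value is modelled here.
def part2_alt (a : List Int) (count : Int) (index : Option Int) : Int :=
  let n : Int := a.length
  let i := index.getD (n - 2)
  if 1 < i ∧ i < n - 1 then
    count + part2Scan a (PySem.List.pyGetD a i 0) i
  else count

-- ===== PRECONDITION & SPEC =====
def Spec_part2 (a : List Int) (count : Int) (index : Option Int) (out : Int) : Prop := out = part2_alt a count index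
instance (a : List Int) (count : Int) (index : Option Int) (out : Int) : Decidable (Spec_part2 a count index out) := by unfold Spec_part2; infer_instance

-- ===== CLAIM (what is proved, stated in full; the proofs are below) =====
def Claim_equal_part2 : Prop := ∀ (a : List Int) (count : Int) (index : Option Int), Dom_part2 a count index → Spec_part2 a count index (part2 a count index)

-- ===== LEMMAS AND PROOFS =====

-- one-step unfolding lemmas for the two workers
lemma go_stop (a : List Int) (count i : Int) (h : ¬(i < (a.length : Int) - 1 ∧ 1 < i)) :
    part2go a count i = count := by
  rw [part2go, dif_neg h]

lemma go_step (a : List Int) (count i : Int) (h : i < (a.length : Int) - 1 ∧ 1 < i) :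
    part2go a count i =
      if |PySem.List.pyGetD a i 0 - PySem.List.pyGetD a (i - 1) 0| < 2 ∧
         |PySem.List.pyGetD a i 0 - PySem.List.pyGetD a (i - 2) 0| < 3 then
        part2go (a.eraseIdx (i - 1).toNat) (count + 1) (i - 1)
      else count := by
  rw [part2go, dif_pos h]

lemma scan_stop (a : List Int) (x p : Int)
    (h : ¬(1 < p ∧ |x - PySem.List.pyGetD a (p - 1) 0| < 2 ∧ |x - PySem.List.pyGetD a (p - 2) 0| < 3)) :
    part2Scan a x p = 0 := by
  rw [part2Scan, dif_neg h]

lemma scan_step (a : List Int) (x p : Int)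
    (h : 1 < p ∧ |x - PySem.List.pyGetD a (p - 1) 0| < 2 ∧ |x - PySem.List.pyGetD a (p - 2) 0| < 3) :
    part2Scan a x p = part2Scan a x (p - 1) + 1 := by
  rw [part2Scan, dif_pos h]

-- reading below the erased position is unchanged
lemma pyGetD_eraseIdx_lt (a : List Int) (m : Nat) (j : Int) (h0 : 0 ≤ j) (hj : j < m)
    (hm : m < a.length) :
    PySem.List.pyGetD (a.eraseIdx m) j 0 = PySem.List.pyGetD a j 0 := by
  have hlen : (a.eraseIdx m).length = a.length - 1 := List.length_eraseIdx_of_lt hm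
  rw [PySem.List.pyGetD_eq_getElem (a.eraseIdx m) 0 h0 (by omega),
      PySem.List.pyGetD_eq_getElem a 0 h0 (by omega)]
  rw [List.getElem_eraseIdx, dif_pos (show j.toNat < m by omega)]

-- the pivot slides down onto the erased slot
lemma pyGetD_eraseIdx_self (a : List Int) (m : Nat) (hm : m + 1 < a.length) :
    PySem.List.pyGetD (a.eraseIdx m) (m : Int) 0 = PySem.List.pyGetD a ((m : Int) + 1) 0 := by
  have hlen : (a.eraseIdx m).length = a.length - 1 := List.length_eraseIdx_of_lt (by omega)
  rw [PySem.List.pyGetD_eq_getElem (a.eraseIdx m) 0 (by omega) (by omega),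
      PySem.List.pyGetD_eq_getElem a 0 (by omega) (by omega)]
  simp only [Int.toNat_natCast, show ((m : Int) + 1).toNat = m + 1 by omega]
  rw [List.getElem_eraseIdx, dif_neg (show ¬ m < m by omega)]

-- the scan only reads positions strictly below its bound, so it ignores the list above N
lemma part2Scan_congr (a b : List Int) (x : Int) (N : Int)
    (hj : ∀ j : Int, 0 ≤ j → j < N → PySem.List.pyGetD a j 0 = PySem.List.pyGetD b j 0) :
    ∀ (n : Nat) (p : Int), p.toNat ≤ n → p ≤ N → part2Scan a x p = part2Scan b x p := by
  intro n
  induction n with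
  | zero =>
      intro p hp _
      have h1 : ¬ 1 < p := by omega
      rw [scan_stop a x p (fun k => h1 k.1), scan_stop b x p (fun k => h1 k.1)]
  | succ n ih =>
      intro p hp hN
      by_cases h1 : 1 < p
      · have e1 : PySem.List.pyGetD a (p - 1) 0 = PySem.List.pyGetD b (p - 1) 0 :=
          hj _ (by omega) (by omega)
        have e2 : PySem.List.pyGetD a (p - 2) 0 = PySem.List.pyGetD b (p - 2) 0 :=
          hj _ (by omega) (by omega)
        by_cases hc : |x - PySem.List.pyGetD a (p - 1) 0| < 2 ∧ |x - PySem.List.pyGetD a (p - 2) 0| < 3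
        · rw [scan_step a x p ⟨h1, hc.1, hc.2⟩,
              scan_step b x p ⟨h1, by rw [← e1]; exact hc.1, by rw [← e2]; exact hc.2⟩,
              ih (p - 1) (by omega) (by omega)]
        · rw [scan_stop a x p (fun k => hc ⟨k.2.1, k.2.2⟩),
              scan_stop b x p (fun k => hc ⟨by rw [e1]; exact k.2.1, by rw [e2]; exact k.2.2⟩)]
      · rw [scan_stop a x p (fun k => h1 k.1), scan_stop b x p (fun k => h1 k.1)]

-- the heart: A's worker equals count + B's scan whenever the guard holds
lemma part2go_eq (a : List Int) (count i : Int) :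
    part2go a count i =
      (if 1 < i ∧ i < (a.length : Int) - 1 then
        count + part2Scan a (PySem.List.pyGetD a i 0) i
      else count) := by
  induction a, count, i using part2go.induct with
  | case1 a count i h diff diff2 hd ih =>
      have hlt : i < (a.length : Int) - 1 := h.1
      have hgt : 1 < i := h.2
      have hd' : |PySem.List.pyGetD a i 0 - PySem.List.pyGetD a (i - 1) 0| < 2 ∧
          |PySem.List.pyGetD a i 0 - PySem.List.pyGetD a (i - 2) 0| < 3 := hd
      have hmnat : (i - 1).toNat < a.length := by omega
      have hlenN : (a.eraseIdx (i - 1).toNat).length = a.length - 1 :=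
        List.length_eraseIdx_of_lt hmnat
      have hpivot : PySem.List.pyGetD (a.eraseIdx (i - 1).toNat) (i - 1) 0
          = PySem.List.pyGetD a i 0 := by
        have h2 : (i - 1).toNat + 1 < a.length := by omega
        have hh := pyGetD_eraseIdx_self a (i - 1).toNat h2
        rw [show (((i - 1).toNat : Int)) = i - 1 by omega] at hh
        rw [hh, show i - 1 + 1 = i by ring]
      rw [go_step a count i h, if_pos hd', ih]
      by_cases h1 : 1 < i - 1
      · rw [if_pos (show 1 < i - 1 ∧ i - 1 < ((a.eraseIdx (i - 1).toNat).length : Int) - 1 from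
              ⟨h1, by omega⟩),
            if_pos ⟨hgt, hlt⟩, hpivot,
            part2Scan_congr (a.eraseIdx (i - 1).toNat) a (PySem.List.pyGetD a i 0) (i - 1)
              (fun j hj0 hjN => pyGetD_eraseIdx_lt a (i - 1).toNat j hj0 (by omega) hmnat)
              (i - 1).toNat (i - 1) le_rfl le_rfl,
            scan_step a (PySem.List.pyGetD a i 0) i ⟨hgt, hd'.1, hd'.2⟩]
        ring
      · rw [if_neg (show ¬(1 < i - 1 ∧ i - 1 < ((a.eraseIdx (i - 1).toNat).length : Int) - 1) from
              fun k => h1 k.1),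
            if_pos ⟨hgt, hlt⟩,
            scan_step a (PySem.List.pyGetD a i 0) i ⟨hgt, hd'.1, hd'.2⟩,
            scan_stop a (PySem.List.pyGetD a i 0) (i - 1) (fun k => h1 k.1)]
        ring
  | case2 a count i h diff diff2 hd =>
      have hd' : ¬(|PySem.List.pyGetD a i 0 - PySem.List.pyGetD a (i - 1) 0| < 2 ∧
          |PySem.List.pyGetD a i 0 - PySem.List.pyGetD a (i - 2) 0| < 3) := hd
      rw [go_step a count i h, if_neg hd', if_pos ⟨h.2, h.1⟩,
          scan_stop a (PySem.List.pyGetD a i 0) i (fun k => hd' ⟨k.2.1, k.2.2⟩)]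
      ring
  | case3 a count i h =>
      rw [go_stop a count i h, if_neg (fun k => h ⟨k.2, k.1⟩)]

-- ===== VERDICT (by name: the statement is the Claim_ definition above) =====
theorem part2_spec : Claim_equal_part2 := by
  intro a count index _
  unfold Spec_part2 part2 part2_alt
  exact part2go_eq a count (index.getD ((a.length : Int) - 2))
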